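-- pv_equiv track=rewrite | github.com/gossotjeanbaptiste/PNSI | 06-Table/Table 2/affichage.py | trouve_taille_colonnes
-- ===== SOURCE A (Python) =====
-- from enum import Enum
--
-- def convert_str(entree):
-- 	"""
-- 	Converti une entrée de la table en str.
-- 	Cette fonction est nécessaire car le cast en str ne donne
-- 	pas un résultat satisfaisant pour les type énumérés
-- 	Auteurs: Gilles BECKER & Rachid CHOUCHI
-- 	Arguments:
-- 		entree : une entrée de la table
-- 	Renvoi:
-- 		une chaine de caractères pour afficher l'entrée
-- 	"""
-- 	texte = ""
-- 	if isinstance(entree, Enum):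
-- 		texte = entree.name.replace("_", " ")
-- 	elif entree == None:
-- 		texte = "NULL"
-- 	else:
-- 		texte = str(entree)
-- 	return texte
--
-- def trouve_taille_colonnes(table, debut, fin):
-- 	"""
-- 	Détermine la taille des colonnes pour la création du texte à afficher
-- 	en cherchant pour chacune d'elle le nombre de caractère maximum à afficher
-- 	Cette recherche ne s'effectue que sur les lignes que l'on cherche à afficher
-- 	Auteurs: Gilles BECKER & Rachid CHOUCHI
-- 	Arguments:
-- 		table : la table
-- 		debut : indice de début de la partie à afficher
-- 		fin   : indice de fin
-- 	Renvoi: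
-- 		une liste des tailles de chaque colonne
-- 	"""
-- 	# On initialise la liste des tailles à 0
-- 	taille_colonnes = [0] * len(table[0])
-- 	""" chercher la taille maximale des chaînes de caractères suivant chaque colonne
-- 		on stocke dans un tableau une liste  """
-- 	# Puis, pour chaque ligne entre debut et fin (la ligne fin étant comprise, il faut aller jusque fin + 1)
-- 	for i in range(debut, fin + 1):
-- 		# Puis, pour chaque colonne
-- 		for j in range(len(taille_colonnes)):
-- 			# On cherche la largeur de l'entrée scannée
-- 			largeur_entree = len(convert_str(table[i][j]))
-- 			if taille_colonnes[j] < largeur_entree: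
-- 				taille_colonnes[j] = largeur_entree
-- 	return taille_colonnes # taille maximale de chaque champ de la table
-- ===== SOURCE B (Python) =====
-- from enum import Enum
--
-- def convert_str(entree):
--     # kept verbatim from A (the Enum branch included)
--     texte = ""
--     if isinstance(entree, Enum):
--         texte = entree.name.replace("_", " ")
--     elif entree == None:
--         texte = "NULL"
--     else:
--         texte = str(entree)
--     return texte
--
-- def trouve_taille_colonnes(table, debut, fin):
--     # Divide and conquer over the row range: the widths of a range are the
--     # elementwise maxima of the widths of its two halves; a single row is its
--     # own width list, an empty range is all zeros.
--     ncols = len(table[0])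
--     def widths(i):
--         return [len(convert_str(table[i][j])) for j in range(ncols)]
--     def merge(a, b):
--         return [x if y <= x else y for x, y in zip(a, b)]
--     def solve(lo, hi):
--         if hi < lo:
--             return [0] * ncols
--         if lo == hi:
--             return widths(lo)
--         mid = (lo + hi) // 2
--         return merge(solve(lo, mid), solve(mid + 1, hi))
--     return solve(debut, fin)
-- ===== Notes on version B (the rewrite author's own statement) =====
-- stated objective: alternative
-- what changed: Replaces the row-major loop mutating a shared width-accumulator array with a divide-and-conquer recursion on the row range that merges the two halves' per-column widths elementwise.
import Mathlib
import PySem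

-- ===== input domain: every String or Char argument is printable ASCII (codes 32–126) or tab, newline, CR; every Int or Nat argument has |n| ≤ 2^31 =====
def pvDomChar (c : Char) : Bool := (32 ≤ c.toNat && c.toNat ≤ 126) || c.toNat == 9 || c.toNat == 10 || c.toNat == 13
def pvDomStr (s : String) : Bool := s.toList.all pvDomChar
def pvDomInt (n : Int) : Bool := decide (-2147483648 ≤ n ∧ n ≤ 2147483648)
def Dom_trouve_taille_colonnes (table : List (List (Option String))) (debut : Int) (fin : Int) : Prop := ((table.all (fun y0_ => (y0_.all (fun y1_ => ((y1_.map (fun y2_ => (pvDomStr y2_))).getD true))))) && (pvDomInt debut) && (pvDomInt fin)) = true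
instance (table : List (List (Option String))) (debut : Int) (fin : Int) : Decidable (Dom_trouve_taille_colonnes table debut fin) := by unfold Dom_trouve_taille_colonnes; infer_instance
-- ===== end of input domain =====

-- B computes the column widths by divide and conquer on the row range (elementwise merge of
-- the two halves' width lists) instead of A's row-major loop mutating a shared accumulator
-- array; objective: alternative (same cost, different algorithm shape).


-- convert_str, kept verbatim in Source B too. Under the task's typed domain an entry is
-- Option String, so the Enum branch of the Python helper is unreachable and the port is:
-- "NULL" for None and str(s) = s for a string.
def convert_str (entree : Option String) : String :=
  match entree with
  | none => "NULL"
  | some s => s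

-- ===== PORT A =====
-- Row-major loop over range(debut, fin+1), mutating the width list in place
-- (list assignment ported with pySetD, indexing with pyGetD; Pre_ excludes the IndexErrors).
def trouve_taille_colonnes (table : List (List (Option String))) (debut : Int) (fin : Int) : List Int :=
  let taille0 : List Int := List.replicate (table.headD []).length 0
  (PySem.List.pyRange debut (fin + 1) 1).foldl (fun taille i =>
    (PySem.List.pyRange 0 (taille.length : Int) 1).foldl (fun t j =>
      let largeur : Int := PySem.Str.len (convert_str (PySem.List.pyGetD (PySem.List.pyGetD table i []) j none))
      if PySem.List.pyGetD t j 0 < largeur then PySem.List.pySetD t j largeur else t) taille) taille0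

-- ===== PORT B =====
-- widths(i): the rendered width of each of row i's first ncols entries
def widthsRow (table : List (List (Option String))) (ncols : Nat) (i : Int) : List Int :=
  (PySem.List.pyRange 0 (ncols : Int) 1).map (fun j =>
    PySem.Str.len (convert_str (PySem.List.pyGetD (PySem.List.pyGetD table i []) j none)))

-- merge(a, b): elementwise [x if y <= x else y for x, y in zip(a, b)]
def mergeMax (a b : List Int) : List Int :=
  (a.zip b).map (fun p => if p.2 ≤ p.1 then p.1 else p.2)

-- solve(lo, hi): divide and conquer on the inclusive row range
def solveCols (table : List (List (Option String))) (ncols : Nat) (lo hi : Int) : List Int :=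
  if _h1 : hi < lo then List.replicate ncols 0
  else if _h2 : lo = hi then widthsRow table ncols lo
  else
    mergeMax (solveCols table ncols lo (PySem.Int.floordiv (lo + hi) 2))
             (solveCols table ncols (PySem.Int.floordiv (lo + hi) 2 + 1) hi)
termination_by (hi - lo).toNat
decreasing_by
  · have h := PySem.Int.floordiv_two_mid_bounds (lo := lo) (hi := hi) (by omega)
    have h2 : PySem.Int.floordiv (lo + hi) 2 < hi := by
      rw [PySem.Int.floordiv_lt_iff_lt_mul (by omega)]; omega
    omega
  · have h := PySem.Int.floordiv_two_mid_bounds (lo := lo) (hi := hi) (by omega)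
    omega

def trouve_taille_colonnes_alt (table : List (List (Option String))) (debut : Int) (fin : Int) : List Int :=
  solveCols table (table.headD []).length debut fin

-- ===== PRECONDITION & SPEC =====
-- Exactly where the Python A returns: table must be nonempty (table[0]), and — unless the first
-- row is empty (inner loop body never runs) or the row range is empty — debut..fin must lie inside
-- the valid (possibly negative) Python index range, and every row whose position is reached by some
-- index in debut..fin (directly or via negative-index wraparound) at least as wide as the first.
def Pre_trouve_taille_colonnes (table : List (List (Option String))) (debut : Int) (fin : Int) : Prop :=
  table ≠ [] ∧ ((table.headD []).length = 0 ∨ fin < debut ∨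
    (-(table.length : Int) ≤ debut ∧ fin < (table.length : Int) ∧
      ∀ p ∈ PySem.List.enumerate table 0,
        ((debut ≤ p.1 ∧ p.1 ≤ fin) ∨ (debut ≤ p.1 - table.length ∧ p.1 - table.length ≤ fin)) →
        (table.headD []).length ≤ p.2.length))
instance (table : List (List (Option String))) (debut : Int) (fin : Int) : Decidable (Pre_trouve_taille_colonnes table debut fin) := by unfold Pre_trouve_taille_colonnes; infer_instance

def pvWitness_trouve_taille_colonnes : List (List (Option String)) × Int × Int :=
  ([[some "ab", none], [some "x", some "yyy"]], 0, 1)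

def Spec_trouve_taille_colonnes (table : List (List (Option String))) (debut : Int) (fin : Int) (out : List Int) : Prop := out = trouve_taille_colonnes_alt table debut fin
instance (table : List (List (Option String))) (debut : Int) (fin : Int) (out : List Int) : Decidable (Spec_trouve_taille_colonnes table debut fin out) := by unfold Spec_trouve_taille_colonnes; infer_instance

-- ===== CLAIM (what is proved, stated in full; the proofs are below) =====
def Claim_equal_trouve_taille_colonnes : Prop := ∀ (table : List (List (Option String))) (debut : Int) (fin : Int), Dom_trouve_taille_colonnes table debut fin → Pre_trouve_taille_colonnes table debut fin → Spec_trouve_taille_colonnes table debut fin (trouve_taille_colonnes table debut fin)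

-- ===== LEMMAS AND PROOFS =====

-- A's inner loop over the columns, abstracted over the row's width function w.
def innerStep (w : Int → Int) (t : List Int) (j : Int) : List Int :=
  if PySem.List.pyGetD t j 0 < w j then PySem.List.pySetD t j (w j) else t

lemma innerStep_eq_set (w : Int → Int) (t : List Int) (j : Nat) (hj : j < t.length) :
    innerStep w t (j : Int) = t.set j (max (t.getD j 0) (w j)) := by
  unfold innerStep
  rw [PySem.List.pyGetD_natCast, PySem.List.pySetD_natCast]
  split_ifs with h
  · congr 1; omega
  · have hmax : max (t.getD j 0) (w (j : Int)) = t.getD j 0 := by omega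
    rw [hmax]
    apply List.ext_getElem
    · simp
    · intro i hp hq
      by_cases hij : i = j
      · subst hij
        rw [List.getElem_set_self]
        simp [List.getD, List.getElem?_eq_getElem hp]
      · rw [List.getElem_set_ne (by omega)]

lemma take_set_succ (t : List Int) (k : Nat) (v : Int) (h : k < t.length) :
    (t.set k v).take (k + 1) = t.take k ++ [v] := by
  rw [List.take_add_one, List.take_set, List.getElem?_set_self h]
  have hs : (List.take k t).set k v = List.take k t := by
    apply List.ext_getElem
    · simp
    · intro i hp hq
      rw [List.getElem_set_ne (by simp at hp; omega)]
  rw [hs]; simp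

lemma getD_set_ne (t : List Int) (k j : Nat) (v : Int) (h : k ≠ j) :
    (t.set k v).getD j 0 = t.getD j 0 := by
  simp [List.getD, List.getElem?_set_ne h]

-- Generalized inner-loop invariant: processing columns k..k+m-1 leaves the prefix and
-- rewrites each later entry j to max t[j] (w j).
lemma inner_fold (w : Int → Int) : ∀ (m : Nat) (k : Nat) (t : List Int), t.length = k + m →
    (PySem.List.pyRange (k : Int) ((k + m : Nat) : Int) 1).foldl (innerStep w) t =
      t.take k ++ (PySem.List.pyRange (k : Int) ((k + m : Nat) : Int) 1).map (fun j => max (PySem.List.pyGetD t j 0) (w j)) := by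
  intro m
  induction m with
  | zero =>
    intro k t ht
    rw [PySem.List.pyRange_one_eq_nil (by push_cast; omega)]
    simp only [List.foldl_nil, List.map_nil, List.append_nil]
    rw [List.take_of_length_le (by omega)]
  | succ m ih =>
    intro k t ht
    have hk : (k : Int) < ((k + (m + 1) : Nat) : Int) := by push_cast; omega
    have hcast : ((k : Int) + 1) = ((k + 1 : Nat) : Int) := by push_cast; ring
    have hcast2 : ((k + (m + 1) : Nat) : Int) = ((k + 1 + m : Nat) : Int) := by push_cast; ring
    rw [PySem.List.pyRange_one_cons hk]
    simp only [List.foldl_cons, List.map_cons]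
    have hlt : k < t.length := by omega
    rw [innerStep_eq_set w t k hlt, hcast, hcast2, ih (k + 1) _ (by simp; omega)]
    set v := max (t.getD k 0) (w (k : Int)) with hv
    rw [take_set_succ t k v hlt, List.append_assoc]
    congr 1
    simp only [List.singleton_append, List.cons.injEq]
    constructor
    · rw [PySem.List.pyGetD_natCast]
    · apply List.map_congr_left
      intro j hj
      rw [PySem.List.mem_pyRange_one] at hj
      obtain ⟨jn, rfl⟩ := Int.eq_ofNat_of_zero_le (by omega : (0 : Int) ≤ j)
      rw [PySem.List.pyGetD_natCast, PySem.List.pyGetD_natCast,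
        getD_set_ne t k jn v (by omega)]

-- The whole inner loop on a full-length list rewrites every entry.
lemma inner_fold_full (w : Int → Int) (t : List Int) :
    (PySem.List.pyRange 0 (t.length : Int) 1).foldl (innerStep w) t =
      (PySem.List.pyRange 0 (t.length : Int) 1).map (fun j => max (PySem.List.pyGetD t j 0) (w j)) := by
  have := inner_fold w t.length 0 t (by omega)
  simpa using this

-- Outer-loop invariant: if the state is cols.map g, one row turns it into cols.map (max of g and
-- that row's widths), hence the whole row loop computes per-column maxima.
lemma outer_fold (n : Nat) (f : Int → Int → Int) :
    ∀ (rs : List Int) (g : Int → Int),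
    rs.foldl (fun taille i =>
        (PySem.List.pyRange 0 ((taille : List Int).length : Int) 1).foldl (innerStep (f i)) taille)
      ((PySem.List.pyRange 0 (n : Int) 1).map g) =
    (PySem.List.pyRange 0 (n : Int) 1).map (fun j => rs.foldl (fun a i => max a (f i j)) (g j)) := by
  intro rs
  induction rs with
  | nil => intro g; rfl
  | cons r rs ih =>
    intro g
    simp only [List.foldl_cons]
    have hlen : ((PySem.List.pyRange 0 (n : Int) 1).map g).length = n := by
      simp [PySem.List.length_pyRange_one]
    rw [hlen]
    have h1 : (PySem.List.pyRange 0 (n : Int) 1).foldl (innerStep (f r))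
        ((PySem.List.pyRange 0 (n : Int) 1).map g) =
        (PySem.List.pyRange 0 (n : Int) 1).map (fun j => max (g j) (f r j)) := by
      have h2 := inner_fold_full (f r) ((PySem.List.pyRange 0 (n : Int) 1).map g)
      rw [hlen] at h2
      rw [h2]
      apply List.map_congr_left
      intro j hj
      rw [PySem.List.mem_pyRange_one] at hj
      rw [PySem.List.pyGetD_map_pyRange_of_nonneg g n j 0 (by omega) (by omega)]
    rw [h1, ih (fun j => max (g j) (f r j))]

-- the width function both ports share
def wFun (table : List (List (Option String))) (i j : Int) : Int :=
  PySem.Str.len (convert_str (PySem.List.pyGetD (PySem.List.pyGetD table i []) j none))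

lemma wFun_nonneg (table : List (List (Option String))) (i j : Int) : 0 ≤ wFun table i j := by
  unfold wFun
  simp [PySem.Str.len_eq]

-- max by another name (B's 'x if y <= x else y')
lemma ite_le_eq_max (x y : Int) : (if y ≤ x then x else y) = max x y := by
  split_ifs with h <;> omega

-- merge of two maps over the same list is the pointwise map
lemma mergeMax_map (l : List Int) (f g : Int → Int) :
    mergeMax (l.map f) (l.map g) = l.map (fun x => max (f x) (g x)) := by
  unfold mergeMax
  rw [List.zip_map']
  rw [List.map_map]
  apply List.map_congr_left
  intro x _
  exact ite_le_eq_max (f x) (g x)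

-- shifting the start of a running max, for a nonnegative start
lemma foldl_max_shift (l : List Int) : ∀ a : Int, 0 ≤ a → l.foldl max a = max a (l.foldl max 0) := by
  induction l with
  | nil => intro a ha; simp; omega
  | cons x l ih =>
    intro a ha
    simp only [List.foldl_cons]
    rw [ih (max a x) (by omega), ih (max 0 x) (by omega)]
    omega

lemma foldl_max_zero_nonneg (l : List Int) : 0 ≤ l.foldl max 0 :=
  (PySem.List.le_foldl_max l 0).1

-- B's divide and conquer computes, per column, the running max (from 0) of the range's widths.
lemma solveCols_eq (table : List (List (Option String))) (ncols : Nat) :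
    ∀ (n : Nat) (lo hi : Int), (hi - lo).toNat = n → lo ≤ hi →
    solveCols table ncols lo hi =
      (PySem.List.pyRange 0 (ncols : Int) 1).map
        (fun j => ((PySem.List.pyRange lo (hi + 1) 1).map (fun i => wFun table i j)).foldl max 0) := by
  intro n
  induction n using Nat.strong_induction_on with
  | _ n ih =>
    intro lo hi hn hle
    by_cases heq : lo = hi
    · subst heq
      rw [solveCols]
      simp only [lt_irrefl, dite_false, dite_true]
      unfold widthsRow
      apply List.map_congr_left
      intro j _
      rw [PySem.List.pyRange_one_cons (by omega), PySem.List.pyRange_one_eq_nil (by omega)]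
      simp only [List.map_cons, List.map_nil, List.foldl_cons, List.foldl_nil]
      exact (max_eq_right (wFun_nonneg table lo j)).symm
    · have hlt : lo < hi := by omega
      obtain ⟨hml, hmr⟩ := PySem.Int.floordiv_two_mid_bounds (lo := lo) (hi := hi) hle
      have hmh : PySem.Int.floordiv (lo + hi) 2 < hi := by
        rw [PySem.Int.floordiv_lt_iff_lt_mul (by omega)]; omega
      set mid := PySem.Int.floordiv (lo + hi) 2 with hmid
      rw [solveCols]
      rw [dif_neg (by omega), dif_neg heq]
      rw [ih (mid - lo).toNat (by omega) lo mid rfl (by omega),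
          ih (hi - (mid + 1)).toNat (by omega) (mid + 1) hi rfl (by omega)]
      rw [mergeMax_map]
      apply List.map_congr_left
      intro j _
      rw [PySem.List.pyRange_one_append lo (mid + 1) (hi + 1) (by omega) (by omega)]
      rw [List.map_append, List.foldl_append]
      rw [foldl_max_shift _ _ (foldl_max_zero_nonneg _)]

-- ===== VERDICT (by name: the statement is the Claim_ definition above) =====
theorem trouve_taille_colonnes_spec : Claim_equal_trouve_taille_colonnes := by
  intro table debut fin _ _
  show trouve_taille_colonnes table debut fin = trouve_taille_colonnes_alt table debut fin
  unfold trouve_taille_colonnes trouve_taille_colonnes_alt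
  set ncols := (table.headD []).length with hn
  -- A's side: per-column running max
  change (PySem.List.pyRange debut (fin + 1) 1).foldl (fun taille i =>
      (PySem.List.pyRange 0 ((taille : List Int).length : Int) 1).foldl
        (innerStep (wFun table i)) taille)
    (List.replicate ncols 0) = _
  have hrep : List.replicate ncols (0 : Int) =
      (PySem.List.pyRange 0 (ncols : Int) 1).map (fun _ => 0) := by
    rw [PySem.List.pyRange_zero_natCast]
    symm
    simp [Function.comp_def]
  rw [hrep, outer_fold ncols (wFun table) (PySem.List.pyRange debut (fin + 1) 1) (fun _ => 0)]
  by_cases hfd : fin < debut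
  · -- empty row range: both sides are all zeros
    rw [solveCols]
    rw [dif_pos hfd, PySem.List.pyRange_one_eq_nil (by omega : fin + 1 ≤ debut)]
    simp only [List.foldl_nil]
    exact hrep.symm
  · rw [solveCols_eq table ncols (fin - debut).toNat debut fin rfl (by omega)]
    apply List.map_congr_left
    intro j _
    rw [List.foldl_map]
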